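-- pv_equiv track=rewrite | github.com/xenotropic/wikipediatts | preprocessor.py | remove_boring_end
-- ===== SOURCE A (Python) =====
-- def remove_boring_end(text):
--     dictionary = {"== Books ==", "== Honors and awards ==" , "== Bibliography ==" , "== Speeches and works ==","== Primary sources ==","== External links ==","== References ==","== Notes and References ==","== See Also ==","== Honours ==","== Honors ==","== Gallery ==","== See also ==","== Further reading ==","== External links ==","== Works= ="}
--     positions=[len(text)]
--     for ending in dictionary:
--         pos = text.find (ending)
--         if ( pos != -1 ): positions.append ( pos ) #if found then add it
--     first_pos = min (positions)
--     return text[:first_pos]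
-- ===== SOURCE B (Python) =====
-- _MARKERS = ("== Books ==", "== Honors and awards ==", "== Bibliography ==",
--             "== Speeches and works ==", "== Primary sources ==", "== External links ==",
--             "== References ==", "== Notes and References ==", "== See Also ==",
--             "== Honours ==", "== Honors ==", "== Gallery ==", "== See also ==",
--             "== Further reading ==", "== Works= =")
--
--
-- def remove_boring_end(text):
--     # single left-to-right scan: cut at the first position where any marker starts
--     for i in range(len(text)):
--         if text.startswith(_MARKERS, i):
--             return text[:i]
--     return text
-- ===== Notes on version B (the rewrite author's own statement) =====
-- stated objective: simpler
-- what changed: Instead of running a separate text.find scan for each of the ~15 markers and taking the min of the collected positions, B makes one left-to-right pass over the text and cuts at the first index where any marker starts (tuple-argument str.startswith).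
import Mathlib
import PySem

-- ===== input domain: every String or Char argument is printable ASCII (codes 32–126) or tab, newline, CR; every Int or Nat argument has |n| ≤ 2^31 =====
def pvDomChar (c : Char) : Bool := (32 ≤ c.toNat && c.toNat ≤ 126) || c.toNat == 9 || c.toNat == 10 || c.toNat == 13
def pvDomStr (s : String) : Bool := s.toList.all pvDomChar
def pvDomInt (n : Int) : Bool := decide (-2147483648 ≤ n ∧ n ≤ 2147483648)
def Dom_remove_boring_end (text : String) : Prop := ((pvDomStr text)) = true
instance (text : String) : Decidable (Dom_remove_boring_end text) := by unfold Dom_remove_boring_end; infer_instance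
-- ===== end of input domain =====

-- B replaces A's per-marker text.find scans + min with one left-to-right scan that cuts
-- at the first index where any marker starts (objective: simpler).

-- ===== PORT A =====
-- the Python set literal, in source order (consumed only through min, which is order-independent)
def boringList : List String :=
  ["== Books ==", "== Honors and awards ==", "== Bibliography ==", "== Speeches and works ==",
   "== Primary sources ==", "== External links ==", "== References ==", "== Notes and References ==",
   "== See Also ==", "== Honours ==", "== Honors ==", "== Gallery ==", "== See also ==",
   "== Further reading ==", "== External links ==", "== Works= ="]

def remove_boring_end (text : String) : String :=
  let dictionary : PySem.Set String := PySem.Set.ofList boringList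
  let positions : List Int :=
    dictionary.foldl (fun ps ending =>
      let pos := PySem.Str.find text ending
      if pos != -1 then ps ++ [pos] else ps) [PySem.Str.len text]
  let first_pos : Int := (PySem.List.min? positions (fun x => x)).getD 0
  PySem.Str.slice text none (some first_pos)

-- ===== PORT B =====
def altMarkers : List String :=
  ["== Books ==", "== Honors and awards ==", "== Bibliography ==", "== Speeches and works ==",
   "== Primary sources ==", "== External links ==", "== References ==", "== Notes and References ==",
   "== See Also ==", "== Honours ==", "== Honors ==", "== Gallery ==", "== See also ==",
   "== Further reading ==", "== Works= ="]

-- text.startswith(markers, i) for 0 ≤ i : exact — some marker is a prefix of text[i:]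
def altGo (s : List Char) (ms : List (List Char)) (i : Nat) : Option Nat :=
  if _h : i < s.length then
    if ms.any (fun m => PySem.Chars.startswith (s.drop i) m) then some i
    else altGo s ms (i + 1)
  else none
termination_by s.length - i

def remove_boring_end_alt (text : String) : String :=
  match altGo text.toList (altMarkers.map String.toList) 0 with
  | some i => String.ofList (text.toList.take i)   -- text[:i], i ≥ 0: exact
  | none => text

-- ===== PRECONDITION & SPEC =====
def Spec_remove_boring_end (text : String) (out : String) : Prop := out = remove_boring_end_alt text
instance (text : String) (out : String) : Decidable (Spec_remove_boring_end text out) := by unfold Spec_remove_boring_end; infer_instance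

-- ===== CLAIM (what is proved, stated in full; the proofs are below) =====
def Claim_equal_remove_boring_end : Prop := ∀ (text : String), Dom_remove_boring_end text → Spec_remove_boring_end text (remove_boring_end text)

-- ===== LEMMAS AND PROOFS =====

-- the set literal deduplicates the repeated "== External links ==" into B's list
lemma setOfBoring : PySem.Set.ofList boringList = altMarkers := by decide

def hitB (s : List Char) (j : Nat) : Bool :=
  (altMarkers.map String.toList).any (fun m => PySem.Chars.startswith (s.drop j) m)

lemma hitB_iff (s : List Char) (j : Nat) :
    hitB s j = true ↔ ∃ m ∈ altMarkers, m.toList <+: s.drop j := by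
  simp [hitB, List.any_eq_true, PySem.Chars.startswith_iff]

lemma altGo_none (s : List Char) (i : Nat)
    (h : ∀ j, i ≤ j → j < s.length → hitB s j = false) :
    altGo s (altMarkers.map String.toList) i = none := by
  unfold altGo
  split
  · next hi =>
    have := h i le_rfl hi
    rw [show ((altMarkers.map String.toList).any fun m => PySem.Chars.startswith (s.drop i) m) = hitB s i from rfl, this]
    simp only [if_neg Bool.false_ne_true]
    exact altGo_none s (i + 1) (fun j hj hj2 => h j (by omega) hj2)
  · rfl
termination_by s.length - i

lemma altGo_some (s : List Char) (i k : Nat)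
    (hik : i ≤ k) (hk : k < s.length) (hhit : hitB s k = true)
    (hmin : ∀ j, i ≤ j → j < k → hitB s j = false) :
    altGo s (altMarkers.map String.toList) i = some k := by
  unfold altGo
  have hi : i < s.length := lt_of_le_of_lt hik hk
  rw [dif_pos hi]
  rw [show ((altMarkers.map String.toList).any fun m => PySem.Chars.startswith (s.drop i) m) = hitB s i from rfl]
  by_cases hik' : i = k
  · subst hik'; rw [hhit]; simp
  · have hlt : i < k := lt_of_le_of_ne hik hik'
    rw [hmin i le_rfl hlt]
    simp only [if_neg Bool.false_ne_true]
    exact altGo_some s (i + 1) k (by omega) hk hhit (fun j hj hj2 => hmin j (by omega) hj2)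
termination_by s.length - i

-- A's first_pos, named
def aPos (text : String) : Int :=
  List.foldl min (PySem.Str.len text)
    (((altMarkers.filter fun m => PySem.Str.find text m != -1).map
        fun m => PySem.Str.find text m))

lemma remove_boring_end_eq (text : String) :
    remove_boring_end text = PySem.Str.slice text none (some (aPos text)) := by
  unfold remove_boring_end
  rw [setOfBoring]
  simp only [PySem.List.foldl_append_if (fun m => PySem.Str.find text m != -1)
      (fun m => PySem.Str.find text m), List.cons_append, List.nil_append,
    PySem.List.min?_id_cons, Option.getD_some]
  rfl

lemma aPos_nonneg (text : String) : 0 ≤ aPos text := by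
  rcases PySem.List.foldl_min_mem
      (((altMarkers.filter fun m => PySem.Str.find text m != -1).map
        fun m => PySem.Str.find text m)) (PySem.Str.len text) with h | h
  · rw [aPos, h, PySem.Str.len_eq]; positivity
  · rw [aPos] at *
    rcases List.mem_map.mp h with ⟨m, hm, hEq⟩
    have hne : PySem.Str.find text m ≠ -1 := by
      have := (List.mem_filter.mp hm).2; simpa using this
    have h1 := PySem.Str.find_eq text m ▸ PySem.Chars.neg_one_le_find text.toList m.toList
    omega

lemma aPos_le_len (text : String) : aPos text ≤ PySem.Str.len text :=
  (PySem.List.foldl_min_le _ _).1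

-- no marker occurs strictly before aPos
lemma no_hit_before (text : String) (j : Nat) (hj : (j : Int) < aPos text) :
    hitB text.toList j = false := by
  by_contra h
  have hhit : hitB text.toList j = true := by
    cases hb : hitB text.toList j with
    | false => exact absurd hb h
    | true => rfl
  rcases (hitB_iff _ _).mp hhit with ⟨m, hm, hpre⟩
  -- m occurs in text, so find ≠ -1 and find ≤ j
  have hocc : m.toList <:+: text.toList :=
    List.infix_iff_prefix_suffix.mpr ⟨_, hpre, List.drop_suffix _ _⟩
  have hfind : 0 ≤ PySem.Chars.find text.toList m.toList :=
    (PySem.Chars.find_nonneg_iff _ _).mpr hocc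
  have hspec := PySem.Chars.find_spec hfind
  have hle : (PySem.Chars.find text.toList m.toList).toNat ≤ j := by
    by_contra hgt
    exact hspec.2 j (by omega) hpre
  -- aPos ≤ find
  have hmem : PySem.Str.find text m ∈
      ((altMarkers.filter fun m => PySem.Str.find text m != -1).map
        fun m => PySem.Str.find text m) := by
    refine List.mem_map.mpr ⟨m, List.mem_filter.mpr ⟨hm, ?_⟩, rfl⟩
    rw [PySem.Str.find_eq]
    simpa using (by omega : PySem.Chars.find text.toList m.toList ≠ -1)
  have hle2 : aPos text ≤ PySem.Str.find text m :=
    (PySem.List.foldl_min_le _ _).2 _ hmem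
  rw [PySem.Str.find_eq] at hle2
  omega

-- if aPos < len then there is a hit exactly at aPos
lemma hit_at_aPos (text : String) (hlt : aPos text < PySem.Str.len text) :
    hitB text.toList (aPos text).toNat = true := by
  rcases PySem.List.foldl_min_mem
      (((altMarkers.filter fun m => PySem.Str.find text m != -1).map
        fun m => PySem.Str.find text m)) (PySem.Str.len text) with h | h
  · exfalso; rw [aPos] at hlt; omega
  · rw [aPos] at *
    rcases List.mem_map.mp h with ⟨m, hm, hEq⟩
    have hne : PySem.Str.find text m ≠ -1 := by
      have := (List.mem_filter.mp hm).2; simpa using this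
    have hnn : 0 ≤ PySem.Chars.find text.toList m.toList := by
      rw [PySem.Str.find_eq] at hne
      have := PySem.Chars.neg_one_le_find text.toList m.toList
      omega
    have hspec := (PySem.Chars.find_spec hnn).1
    refine (hitB_iff _ _).mpr ⟨m, (List.mem_filter.mp hm).1, ?_⟩
    rw [← hEq, PySem.Str.find_eq]
    exact hspec

lemma slice_to_str (text : String) (b : Int) (hb : 0 ≤ b) :
    PySem.Str.slice text none (some b) = String.ofList (text.toList.take b.toNat) := by
  simp [PySem.Str.slice, PySem.List.slice_to _ hb]

-- ===== VERDICT (by name: the statement is the Claim_ definition above) =====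
theorem remove_boring_end_spec : Claim_equal_remove_boring_end := by
  intro text _
  unfold Spec_remove_boring_end
  rw [remove_boring_end_eq, slice_to_str text _ (aPos_nonneg text)]
  unfold remove_boring_end_alt
  by_cases hlt : aPos text < PySem.Str.len text
  · rw [altGo_some text.toList 0 (aPos text).toNat (Nat.zero_le _)
      (by have := PySem.Str.len_eq text; have := aPos_nonneg text; omega)
      (hit_at_aPos text hlt)
      (fun j _ hj => no_hit_before text j (by have := aPos_nonneg text; omega))]
  · have heq : aPos text = PySem.Str.len text := le_antisymm (aPos_le_len text) (by omega)
    rw [altGo_none text.toList 0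
      (fun j _ hj => no_hit_before text j (by rw [heq, PySem.Str.len_eq]; omega))]
    rw [heq, PySem.Str.len_eq]
    simp only [Int.toNat_natCast, List.take_length, String.ofList_toList]
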